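-- pv_equiv track=rewrite | github.com/fschatbot/Advent-Calendar-Python | 2015/3/runner.py | follow_ins
-- ===== SOURCE A (Python) =====
-- def follow_ins(ins):
-- 	posx, posy = 0, 0
-- 	poses = [(posx, posy)]
-- 	for char in ins:
-- 		if char == '^':
-- 			posy += 1
-- 		elif char == 'v':
-- 			posy -= 1
-- 		elif char == '>':
-- 			posx += 1
-- 		elif char == '<':
-- 			posx -= 1
-- 		poses.append((posx, posy))
-- 	return poses
-- ===== SOURCE B (Python) =====
-- from itertools import accumulate
--
-- DELTAS = {'^': (0, 1), 'v': (0, -1), '>': (1, 0), '<': (-1, 0)}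
--
-- def follow_ins(ins):
-- 	deltas = [DELTAS.get(c, (0, 0)) for c in ins]
-- 	return list(accumulate(deltas, lambda a, b: (a[0] + b[0], a[1] + b[1]), initial=(0, 0)))
-- ===== Notes on version B (the rewrite author's own statement) =====
-- stated objective: alternative
-- what changed: Replaces the branch-and-append stateful loop by a delta-table map followed by a prefix-sum scan (itertools.accumulate seeded with the origin).
import Mathlib
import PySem

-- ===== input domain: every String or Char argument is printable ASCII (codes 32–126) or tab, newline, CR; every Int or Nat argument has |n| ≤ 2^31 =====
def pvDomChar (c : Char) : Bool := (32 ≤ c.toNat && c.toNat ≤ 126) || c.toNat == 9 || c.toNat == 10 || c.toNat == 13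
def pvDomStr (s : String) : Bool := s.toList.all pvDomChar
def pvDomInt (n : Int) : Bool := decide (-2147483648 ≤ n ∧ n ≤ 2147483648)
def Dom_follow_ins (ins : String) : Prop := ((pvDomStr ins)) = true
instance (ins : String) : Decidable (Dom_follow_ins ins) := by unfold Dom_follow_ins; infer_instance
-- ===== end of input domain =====

-- B replaces A's branch-and-append stateful loop by a delta-table map plus a prefix-sum scan (alternative decomposition, same cost).

-- ===== PORT A =====
-- loop state: (current position, accumulated list); branches in A's order
def followStep (st : (Int × Int) × List (Int × Int)) (c : Char) : (Int × Int) × List (Int × Int) :=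
  let p :=
    if c = '^' then (st.1.1, st.1.2 + 1)
    else if c = 'v' then (st.1.1, st.1.2 - 1)
    else if c = '>' then (st.1.1 + 1, st.1.2)
    else if c = '<' then (st.1.1 - 1, st.1.2)
    else st.1
  (p, st.2 ++ [p])

def follow_ins (ins : String) : List (Int × Int) :=
  (ins.toList.foldl followStep ((0, 0), [((0 : Int), (0 : Int))])).2

-- ===== PORT B =====
-- DELTAS.get(c, (0,0))
def deltaOf (c : Char) : Int × Int :=
  if c = '^' then (0, 1)
  else if c = 'v' then (0, -1)
  else if c = '>' then (1, 0)
  else if c = '<' then (-1, 0)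
  else (0, 0)

def addPair (a b : Int × Int) : Int × Int := (a.1 + b.1, a.2 + b.2)

-- accumulate(deltas, add, initial=(0,0)) = scanl
def follow_ins_alt (ins : String) : List (Int × Int) :=
  List.scanl addPair (0, 0) (ins.toList.map deltaOf)

-- ===== PRECONDITION & SPEC =====
def Spec_follow_ins (ins : String) (out : List (Int × Int)) : Prop := out = follow_ins_alt ins
instance (ins : String) (out : List (Int × Int)) : Decidable (Spec_follow_ins ins out) := by unfold Spec_follow_ins; infer_instance

-- ===== CLAIM (what is proved, stated in full; the proofs are below) =====
def Claim_equal_follow_ins : Prop := ∀ (ins : String), Dom_follow_ins ins → Spec_follow_ins ins (follow_ins ins)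

-- ===== LEMMAS AND PROOFS =====
theorem scanl_head_tail (f : (Int × Int) → (Int × Int) → Int × Int) (b : Int × Int) (l : List (Int × Int)) :
    b :: (List.scanl f b l).tail = List.scanl f b l := by
  cases l <;> simp

theorem followStep_pos (p : Int × Int) (acc : List (Int × Int)) (c : Char) :
    followStep (p, acc) c = (addPair p (deltaOf c), acc ++ [addPair p (deltaOf c)]) := by
  simp only [followStep, deltaOf, addPair]
  split_ifs <;> simp <;> ring

theorem foldl_followStep (l : List Char) (p : Int × Int) (acc : List (Int × Int)) :
    (l.foldl followStep (p, acc)).2 = acc ++ (List.scanl addPair p (l.map deltaOf)).tail := by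
  induction l generalizing p acc with
  | nil => simp
  | cons c l ih =>
      simp only [List.foldl_cons, List.map_cons, List.scanl_cons, List.tail_cons,
        followStep_pos]
      rw [ih, List.append_assoc]
      rw [show [addPair p (deltaOf c)] ++ (List.scanl addPair (addPair p (deltaOf c)) (l.map deltaOf)).tail = List.scanl addPair (addPair p (deltaOf c)) (l.map deltaOf) from scanl_head_tail ..]

-- ===== VERDICT (by name: the statement is the Claim_ definition above) =====
theorem follow_ins_spec : Claim_equal_follow_ins := by
  intro ins _
  show follow_ins ins = follow_ins_alt ins
  simp only [follow_ins, follow_ins_alt, foldl_followStep]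
  exact scanl_head_tail ..
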